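-- pv_equiv track=rewrite | github.com/mchoudhry1/OSNA-CS-579 | a4/classify.py | afinn_sentiment
-- ===== SOURCE A (Python) =====
-- def afinn_sentiment(terms, afinn):
--     positive = 0
--     negative = 0
--     for t in terms:
--         if t in afinn:
--             if afinn[t] > 0:
--                 positive += afinn[t]
--             else:
--                 negative += -1 * afinn[t]
--     return positive, negative
-- ===== SOURCE B (Python) =====
-- def afinn_sentiment(terms, afinn):
--     # Invert the traversal: count the terms once, then make a single pass over
--     # the AFINN lexicon itself, weighting each entry by its multiplicity.
--     counts = {}
--     for t in terms:
--         counts[t] = counts.get(t, 0) + 1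
--     positive = 0
--     negative = 0
--     for word, score in afinn.items():
--         c = counts.get(word, 0)
--         if score > 0:
--             positive += c * score
--         else:
--             negative += c * -score
--     return positive, negative
-- ===== Notes on version B (the rewrite author's own statement) =====
-- stated objective: alternative
-- what changed: B inverts the traversal: instead of A's single loop over the terms with a dict lookup per term, B builds a frequency counter of the terms once and then iterates over the AFINN lexicon entries, weighting each entry's score by the term's multiplicity.
import Mathlib
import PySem

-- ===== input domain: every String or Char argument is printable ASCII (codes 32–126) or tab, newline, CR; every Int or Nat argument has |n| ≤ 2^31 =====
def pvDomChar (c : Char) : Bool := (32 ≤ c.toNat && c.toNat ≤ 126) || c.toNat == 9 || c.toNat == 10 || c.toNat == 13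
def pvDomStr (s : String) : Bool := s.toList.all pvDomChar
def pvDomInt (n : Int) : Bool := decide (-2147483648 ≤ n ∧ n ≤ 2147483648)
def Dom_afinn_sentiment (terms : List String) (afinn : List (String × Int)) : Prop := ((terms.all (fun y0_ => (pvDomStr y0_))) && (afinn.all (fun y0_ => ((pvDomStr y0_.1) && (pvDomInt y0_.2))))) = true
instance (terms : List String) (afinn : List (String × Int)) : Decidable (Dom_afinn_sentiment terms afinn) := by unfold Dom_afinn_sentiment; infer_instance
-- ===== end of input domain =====

-- B replaces A's per-term lookup loop by a term counter plus one weighted pass over the lexicon (alternative decomposition, same cost).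

-- ===== PORT A =====
-- dict[str,int] as association list: lookup = first match (exact for Python dicts, whose keys are unique)
def pvLookup (afinn : List (String × Int)) (t : String) : Option Int :=
  (afinn.find? (fun p => p.1 == t)).map (·.2)

-- port of A: one loop over terms carrying both counters, branch per term
def afinn_sentiment (terms : List String) (afinn : List (String × Int)) : Int × Int :=
  terms.foldl
    (fun (pn : Int × Int) t =>
      match pvLookup afinn t with
      | some v => if v > 0 then (pn.1 + v, pn.2) else (pn.1, pn.2 + (-1) * v)
      | none => pn)
    (0, 0)

-- ===== PORT B =====
-- port of B: build a counter of the terms, then one weighted pass over the lexicon entries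
def afinn_sentiment_alt (terms : List String) (afinn : List (String × Int)) : Int × Int :=
  let counts := terms.foldl (fun (d : PySem.Dict String Int) t => d.modify t 0 (· + 1)) PySem.Dict.empty
  afinn.foldl
    (fun (pn : Int × Int) kv =>
      if kv.2 > 0 then (pn.1 + counts.getD kv.1 0 * kv.2, pn.2)
      else (pn.1, pn.2 + counts.getD kv.1 0 * (-kv.2)))
    (0, 0)

-- ===== PRECONDITION & SPEC =====
-- Pre_ restricts the association-list encoding of the dict `afinn` to unique keys,
-- which every actual Python dict satisfies; it excludes no Python input.
def Pre_afinn_sentiment (terms : List String) (afinn : List (String × Int)) : Prop :=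
  (afinn.map Prod.fst).Nodup
instance (terms : List String) (afinn : List (String × Int)) : Decidable (Pre_afinn_sentiment terms afinn) := by unfold Pre_afinn_sentiment; infer_instance

def pvWitness_afinn_sentiment : List String × (List (String × Int)) :=
  (["good", "bad", "good"], [("good", 3), ("bad", -2)])

def Spec_afinn_sentiment (terms : List String) (afinn : List (String × Int)) (out : Int × Int) : Prop := out = afinn_sentiment_alt terms afinn
instance (terms : List String) (afinn : List (String × Int)) (out : Int × Int) : Decidable (Spec_afinn_sentiment terms afinn out) := by unfold Spec_afinn_sentiment; infer_instance

-- ===== CLAIM =====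
def Claim_equal_afinn_sentiment : Prop := ∀ (terms : List String) (afinn : List (String × Int)), Dom_afinn_sentiment terms afinn → Pre_afinn_sentiment terms afinn → Spec_afinn_sentiment terms afinn (afinn_sentiment terms afinn)

-- ===== LEMMAS AND PROOFS =====
-- positive / negative contribution of a single score
def gp (v : Int) : Int := if v > 0 then v else 0
def gn (v : Int) : Int := if v > 0 then 0 else -v

-- A's fold = two sums over the terms
theorem a_fold_sum (afinn : List (String × Int)) :
    ∀ (terms : List String) (p n : Int),
      terms.foldl
        (fun (pn : Int × Int) t =>
          match pvLookup afinn t with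
          | some v => if v > 0 then (pn.1 + v, pn.2) else (pn.1, pn.2 + (-1) * v)
          | none => pn)
        (p, n)
      = (p + (terms.map (fun t => (pvLookup afinn t).elim 0 gp)).sum,
         n + (terms.map (fun t => (pvLookup afinn t).elim 0 gn)).sum) := by
  intro terms
  induction terms with
  | nil => intro p n; simp
  | cons t ts ih =>
    intro p n
    simp only [List.foldl_cons, List.map_cons, List.sum_cons]
    cases h : pvLookup afinn t with
    | none => rw [ih]; simp [h]
    | some v =>
      by_cases hv : v > 0
      · simp only [hv, if_pos, h]
        rw [ih]; simp [gp, gn, hv]; ring_nf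
      · simp only [hv, if_neg, h]
        rw [ih]; simp [gp, gn, hv]; ring_nf

-- B's fold = two weighted sums over the lexicon entries
theorem b_fold_sum (cnt : String → Int) :
    ∀ (afinn : List (String × Int)) (p n : Int),
      afinn.foldl
        (fun (pn : Int × Int) kv =>
          if kv.2 > 0 then (pn.1 + cnt kv.1 * kv.2, pn.2)
          else (pn.1, pn.2 + cnt kv.1 * (-kv.2)))
        (p, n)
      = (p + (afinn.map (fun kv => cnt kv.1 * gp kv.2)).sum,
         n + (afinn.map (fun kv => cnt kv.1 * gn kv.2)).sum) := by
  intro afinn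
  induction afinn with
  | nil => intro p n; simp
  | cons kv rest ih =>
    intro p n
    simp only [List.foldl_cons, List.map_cons, List.sum_cons]
    by_cases hv : kv.2 > 0
    · simp only [hv, if_pos]
      rw [ih]; simp [gp, gn, hv]; ring_nf
    · simp only [hv, if_neg]
      rw [ih]; simp [gp, gn, hv]; ring_nf

theorem pvLookup_eq_none_of_not_mem (afinn : List (String × Int)) (k : String)
    (h : k ∉ afinn.map Prod.fst) : pvLookup afinn k = none := by
  unfold pvLookup
  rw [List.find?_eq_none.2]
  · rfl
  · intro p hp hb
    exact h (List.mem_map.2 ⟨p, hp, by simpa using hb⟩)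

-- splitting a sum over terms at one key (f vanishing at the key)
theorem sum_if_split (k : String) (a : Int) (f : String → Int) (hf : f k = 0) :
    ∀ (terms : List String),
      (terms.map (fun t => if t = k then a else f t)).sum
        = (terms.count k : Int) * a + (terms.map f).sum := by
  intro terms
  induction terms with
  | nil => simp
  | cons t ts ih =>
    by_cases ht : t = k
    · subst ht
      simp only [List.map_cons, List.sum_cons, if_pos rfl, ih, List.count_cons_self, hf]
      push_cast; ring
    · simp only [List.map_cons, List.sum_cons, if_neg ht, ih,
        List.count_cons_of_ne (by simpa using ht)]
      ring

-- the traversal inversion: sum over terms of a looked-up contribution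
-- equals sum over the (unique-keyed) lexicon of count-weighted contributions
theorem sum_commute (g : Int → Int) (terms : List String) :
    ∀ (afinn : List (String × Int)), (afinn.map Prod.fst).Nodup →
      (terms.map (fun t => (pvLookup afinn t).elim 0 g)).sum
        = (afinn.map (fun kv => (terms.count kv.1 : Int) * g kv.2)).sum := by
  intro afinn
  induction afinn with
  | nil =>
    intro _
    simp [pvLookup]
  | cons kv rest ih =>
    intro hnd
    obtain ⟨hk, hnd'⟩ := by simpa using hnd
    have hstep : ∀ t : String,
        (pvLookup (kv :: rest) t).elim 0 g
          = if t = kv.1 then g kv.2 else (pvLookup rest t).elim 0 g := by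
      intro t
      by_cases ht : t = kv.1
      · subst ht
        simp [pvLookup]
      · simp [pvLookup, ht, show (kv.1 == t) = false by
          simpa using fun h => ht h.symm]
    simp only [hstep]
    rw [sum_if_split kv.1 (g kv.2) (fun t => (pvLookup rest t).elim 0 g)
      (by have h0 := pvLookup_eq_none_of_not_mem rest kv.1 (by simpa using hk)
          simp [h0])]
    rw [ih hnd']
    simp

-- ===== VERDICT =====
theorem afinn_sentiment_spec : Claim_equal_afinn_sentiment := by
  intro terms afinn _ hpre
  simp only [Spec_afinn_sentiment, afinn_sentiment, afinn_sentiment_alt]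
  rw [a_fold_sum,
    b_fold_sum (fun k => (terms.foldl (fun (d : PySem.Dict String Int) t => d.modify t 0 (· + 1)) PySem.Dict.empty).getD k 0)]
  have hcnt : ∀ k : String,
      (terms.foldl (fun (d : PySem.Dict String Int) t => d.modify t 0 (· + 1)) PySem.Dict.empty).getD k 0
        = (terms.count k : Int) := by
    intro k
    rw [PySem.Dict.getD_foldl_modify_add_one]
    simp
  simp only [hcnt]
  rw [sum_commute gp terms afinn hpre, sum_commute gn terms afinn hpre]
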